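-- pv_equiv track=rewrite | github.com/FastAsChuff/Primitive-Sequences-With-Minimal-Sum-Calculator | primseqs.py | reservedspace
-- ===== SOURCE A (Python) =====
-- def containsmultiple(f, s):
--   for x in s:
--     if x % f == 0:
--       return True
--   return False
--
-- def reservedspace(d, s):
--   space = 0
--   x = 2
--   if containsmultiple(2, s):
--     x = 3
--     if containsmultiple(3, s):
--       x = 4
--   while (d):
--     if x not in s:
--       space += x
--       d -= 1
--     x += 1
--   return space
-- ===== SOURCE B (Python) =====
-- def reservedspace(d, s):
--     # start point: same rule as the spec (2, bumped past 3/4 if s contains a multiple of 2 / of 3)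
--     x = 2
--     if any(v % 2 == 0 for v in s):
--         x = 3
--         if any(v % 3 == 0 for v in s):
--             x = 4
--     # the chosen numbers are the integers in [x, n] minus the reserved ones;
--     # walk the sorted reserved values once, extending the right end n for each one skipped
--     n = x + d - 1
--     skipped = 0
--     for e in sorted({v for v in s if v >= x}):
--         if e > n:
--             break
--         n += 1
--         skipped += e
--     return (x + n) * (n - x + 1) // 2 - skipped
-- ===== Notes on version B (the rewrite author's own statement) =====
-- stated objective: alternative
-- what changed: A walks candidate integers one by one, testing each for membership in s and accumulating until d free ones are summed; B instead sorts the reserved values once and computes the result as an arithmetic series in closed form, extending the interval end once per reserved value it skips.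
import Mathlib
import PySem

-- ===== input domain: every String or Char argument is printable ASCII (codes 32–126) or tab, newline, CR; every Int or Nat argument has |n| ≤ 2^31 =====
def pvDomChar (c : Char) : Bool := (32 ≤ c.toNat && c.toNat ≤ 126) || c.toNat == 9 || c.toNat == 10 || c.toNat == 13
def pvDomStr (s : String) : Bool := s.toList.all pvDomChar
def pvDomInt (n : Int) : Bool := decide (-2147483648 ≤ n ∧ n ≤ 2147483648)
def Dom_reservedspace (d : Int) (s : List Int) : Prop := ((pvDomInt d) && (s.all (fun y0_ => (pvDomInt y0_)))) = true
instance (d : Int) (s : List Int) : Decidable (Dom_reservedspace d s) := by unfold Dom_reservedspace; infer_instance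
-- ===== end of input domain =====

-- B replaces A's one-by-one counting loop over all candidate integers by sorting the
-- reserved values once and summing an arithmetic series in closed form.

-- ===== PORT A =====
def containsmultiple (f : Int) (s : List Int) : Bool :=
  match s with
  | [] => false
  | x :: rest => if PySem.Int.mod x f = 0 then true else containsmultiple f rest

-- termination helpers for the while-loop (cited in decreasing_by)
theorem pvFilterSuccLen_le (x : Int) (s : List Int) :
    (s.filter (fun v => x + 1 ≤ v)).length ≤ (s.filter (fun v => x ≤ v)).length := by
  induction s with
  | nil => simp
  | cons a t ih =>
    simp only [List.filter_cons]
    by_cases h1 : x + 1 ≤ a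
    · rw [if_pos (by simp only [decide_eq_true_eq]; omega),
         if_pos (by simp only [decide_eq_true_eq]; omega)]
      simpa using ih
    · rw [if_neg (by simp only [decide_eq_true_eq]; omega)]
      split
      · simpa using Nat.le_succ_of_le ih
      · exact ih

theorem pvFilterSuccLen_lt (x : Int) (s : List Int) (hx : x ∈ s) :
    (s.filter (fun v => x + 1 ≤ v)).length < (s.filter (fun v => x ≤ v)).length := by
  induction s with
  | nil => simp at hx
  | cons a t ih =>
    simp only [List.filter_cons]
    rcases List.mem_cons.mp hx with rfl | hxt
    · rw [if_neg (by simp only [decide_eq_true_eq]; omega),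
         if_pos (by simp only [decide_eq_true_eq]; omega)]
      simpa using Nat.lt_succ_of_le (pvFilterSuccLen_le x t)
    · by_cases h1 : x + 1 ≤ a
      · rw [if_pos (by simp only [decide_eq_true_eq]; omega),
           if_pos (by simp only [decide_eq_true_eq]; omega)]
        simpa using ih hxt
      · rw [if_neg (by simp only [decide_eq_true_eq]; omega)]
        split
        · simpa using Nat.lt_succ_of_le (le_of_lt (ih hxt))
        · exact ih hxt

-- the Python 'while (d)' loop; the 'd ≤ 0' guard only makes the recursion total
-- (Python diverges for d < 0 — excluded by Pre_; for d = 0 it behaves identically)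
def reservedspaceLoop (s : List Int) (x d space : Int) : Int :=
  if d ≤ 0 then space
  else if hx : x ∈ s then reservedspaceLoop s (x + 1) d space
  else reservedspaceLoop s (x + 1) (d - 1) (space + x)
termination_by d.toNat + (s.filter (fun v => x ≤ v)).length
decreasing_by
  · have := pvFilterSuccLen_lt x s hx
    omega
  · have := pvFilterSuccLen_le x s
    omega

def reservedspace (d : Int) (s : List Int) : Int :=
  let x : Int := if containsmultiple 2 s then (if containsmultiple 3 s then 4 else 3) else 2
  reservedspaceLoop s x d 0

-- ===== PORT B =====
def bLoop (l : List Int) (n skipped : Int) : Int × Int :=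
  match l with
  | [] => (n, skipped)
  | e :: rest => if e > n then (n, skipped) else bLoop rest (n + 1) (skipped + e)

def reservedspace_alt (d : Int) (s : List Int) : Int :=
  let x : Int :=
    if s.any (fun v => PySem.Int.mod v 2 = 0) then
      (if s.any (fun v => PySem.Int.mod v 3 = 0) then 4 else 3)
    else 2
  let p := bLoop (PySem.List.sorted (PySem.Set.ofList (s.filter (fun v => x ≤ v))) (fun v => v)) (x + d - 1) 0
  PySem.Int.floordiv ((x + p.1) * (p.1 - x + 1)) 2 - p.2

-- ===== PRECONDITION & SPEC =====
-- Pre_ excludes only d < 0, on which A's 'while (d)' loop never terminates (Python diverges).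
def Pre_reservedspace (d : Int) (s : List Int) : Prop := 0 ≤ d
instance (d : Int) (s : List Int) : Decidable (Pre_reservedspace d s) := by unfold Pre_reservedspace; infer_instance
def pvWitness_reservedspace : Int × List Int := (3, [2, 4, 7])

def Spec_reservedspace (d : Int) (s : List Int) (out : Int) : Prop := out = reservedspace_alt d s
instance (d : Int) (s : List Int) (out : Int) : Decidable (Spec_reservedspace d s out) := by unfold Spec_reservedspace; infer_instance

-- ===== CLAIM (what is proved, stated in full; the proofs are below) =====
def Claim_equal_reservedspace : Prop := ∀ (d : Int) (s : List Int), Dom_reservedspace d s → Pre_reservedspace d s → Spec_reservedspace d s (reservedspace d s)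

-- ===== LEMMAS AND PROOFS =====

-- A's helper is List.any of the divisibility test
theorem cm_eq (f : Int) (s : List Int) :
    containsmultiple f s = s.any (fun v => PySem.Int.mod v f = 0) := by
  induction s with
  | nil => rfl
  | cons a t ih =>
    by_cases h : PySem.Int.mod a f = 0 <;> simp [containsmultiple, h, ih]

-- B's sorted list of reserved values ≥ x, and B's core value for start point x
def sExcl (s : List Int) (x : Int) : List Int :=
  PySem.List.sorted (PySem.Set.ofList (s.filter (fun v => x ≤ v))) (fun v => v)

def Bcore (s : List Int) (x d : Int) : Int :=
  let p := bLoop (sExcl s x) (x + d - 1) 0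
  PySem.Int.floordiv ((x + p.1) * (p.1 - x + 1)) 2 - p.2

theorem Bcore_def (s : List Int) (x d : Int) :
    Bcore s x d =
      PySem.Int.floordiv ((x + (bLoop (sExcl s x) (x + d - 1) 0).1) *
          ((bLoop (sExcl s x) (x + d - 1) 0).1 - x + 1)) 2 -
        (bLoop (sExcl s x) (x + d - 1) 0).2 := rfl

theorem mem_sExcl (s : List Int) (x v : Int) : v ∈ sExcl s x ↔ v ∈ s ∧ x ≤ v := by
  unfold sExcl
  rw [PySem.List.mem_sorted, PySem.Set.mem_ofList, List.mem_filter]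
  simp

-- reserved list at start x, when x itself is reserved: x is its head
theorem sExcl_cons (s : List Int) (x : Int) (hx : x ∈ s) :
    sExcl s x = x :: sExcl s (x + 1) := by
  unfold sExcl
  apply PySem.List.sorted_eq_of_perm_of_pairwise_lt
  · apply (List.perm_ext_iff_of_nodup ?_ (PySem.Set.nodup_ofList _)).mpr
    · intro v
      simp only [List.mem_cons, PySem.List.mem_sorted, PySem.Set.mem_ofList, List.mem_filter,
        decide_eq_true_eq]
      constructor
      · rintro (rfl | ⟨hv, hle⟩)
        · exact ⟨hx, by omega⟩
        · exact ⟨hv, by omega⟩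
      · rintro ⟨hv, hle⟩
        by_cases h : v = x
        · exact Or.inl h
        · exact Or.inr ⟨hv, by omega⟩
    · refine List.nodup_cons.mpr ⟨?_, (PySem.List.sorted_ofList_pairwise_lt _).imp (fun h => ne_of_lt h)⟩
      intro h
      have h1 := (PySem.List.mem_sorted _ _ _ _).mp h
      have h2 := (PySem.Set.mem_ofList _ _).mp h1
      have h3 := (List.mem_filter.mp h2).2
      simp only [decide_eq_true_eq] at h3
      omega
  · refine List.Pairwise.cons ?_ (PySem.List.sorted_ofList_pairwise_lt _)
    intro v hv
    have h1 := (PySem.List.mem_sorted _ _ _ _).mp hv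
    have h2 := (PySem.Set.mem_ofList _ _).mp h1
    have h3 := (List.mem_filter.mp h2).2
    simp only [decide_eq_true_eq] at h3
    omega

-- reserved list at start x, when x is not reserved: same list as at x + 1
theorem sExcl_skip (s : List Int) (x : Int) (hx : x ∉ s) :
    sExcl s x = sExcl s (x + 1) := by
  unfold sExcl
  congr 1
  congr 1
  apply List.filter_congr
  intro v hv
  have hne : v ≠ x := fun h => hx (h ▸ hv)
  by_cases h : x + 1 ≤ v
  · have h0 : x ≤ v := by omega
    simp [h, h0]
  · have h0 : ¬ x ≤ v := by omega
    simp [h, h0]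

theorem bLoop_break (l : List Int) (x n sk : Int) (hmem : ∀ v ∈ l, x ≤ v) (hn : n < x) :
    bLoop l n sk = (n, sk) := by
  cases l with
  | nil => rfl
  | cons e t =>
    have he : e > n := by have := hmem e (List.mem_cons_self ..); omega
    simp [bLoop, he]

theorem bLoop_acc (l : List Int) (n sk : Int) :
    bLoop l n sk = ((bLoop l n 0).1, sk + (bLoop l n 0).2) := by
  induction l generalizing n sk with
  | nil => simp [bLoop]
  | cons e t ih =>
    by_cases h : e > n
    · simp [bLoop, h]
    · simp only [bLoop, if_neg h]
      rw [ih (n + 1) (sk + e), ih (n + 1) (0 + e)]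
      simp only [Prod.mk.injEq, true_and]
      ring

theorem fdiv_shift (m x : Int) :
    PySem.Int.floordiv (m + x * 2) 2 = PySem.Int.floordiv m 2 + x := by
  rw [PySem.Int.floordiv_eq_ediv_of_pos (by omega), PySem.Int.floordiv_eq_ediv_of_pos (by omega)]
  exact Int.add_mul_ediv_right m x (by omega)

theorem tri_step (x n : Int) :
    PySem.Int.floordiv ((x + n) * (n - x + 1)) 2 =
      PySem.Int.floordiv ((x + 1 + n) * (n - (x + 1) + 1)) 2 + x := by
  have h : (x + n) * (n - x + 1) = (x + 1 + n) * (n - (x + 1) + 1) + x * 2 := by ring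
  rw [h, fdiv_shift]

theorem Bcore_zero (s : List Int) (x : Int) : Bcore s x 0 = 0 := by
  rw [Bcore_def]
  rw [bLoop_break (sExcl s x) x (x + 0 - 1) 0
      (fun v hv => ((mem_sExcl s x v).mp hv).2) (by omega)]
  dsimp only
  have h : (x + (x + 0 - 1)) * (x + 0 - 1 - x + 1) = 0 := by ring
  rw [h, PySem.Int.floordiv_eq_ediv_of_pos (by omega)]
  simp

theorem Bcore_mem (s : List Int) (x d : Int) (hd : 1 ≤ d) (hx : x ∈ s) :
    Bcore s x d = Bcore s (x + 1) d := by
  rw [Bcore_def, Bcore_def, sExcl_cons s x hx]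
  have hng : ¬ (x > x + d - 1) := by omega
  simp only [bLoop, if_neg hng, zero_add]
  have hn : x + d - 1 + 1 = x + 1 + d - 1 := by ring
  rw [hn, bLoop_acc (sExcl s (x + 1)) (x + 1 + d - 1) x]
  dsimp only
  set q := bLoop (sExcl s (x + 1)) (x + 1 + d - 1) 0 with hq
  rw [tri_step x q.1]
  omega

theorem Bcore_skip (s : List Int) (x d : Int) (hd : 1 ≤ d) (hx : x ∉ s) :
    Bcore s x d = x + Bcore s (x + 1) (d - 1) := by
  rw [Bcore_def, Bcore_def, sExcl_skip s x hx]
  have hn : x + d - 1 = x + 1 + (d - 1) - 1 := by ring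
  rw [hn]
  set q := bLoop (sExcl s (x + 1)) (x + 1 + (d - 1) - 1) 0 with hq
  rw [tri_step x q.1]
  omega

theorem main_loop (s : List Int) (k : Nat) :
    ∀ (x d space : Int), 0 ≤ d →
      d.toNat + (s.filter (fun v => x ≤ v)).length ≤ k →
      reservedspaceLoop s x d space = space + Bcore s x d := by
  induction k with
  | zero =>
    intro x d space hd hk
    have hd0 : d = 0 := by omega
    subst hd0
    rw [reservedspaceLoop]
    simp [Bcore_zero]
  | succ k ih =>
    intro x d space hd hk
    rw [reservedspaceLoop]
    by_cases hdz : d ≤ 0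
    · have hd0 : d = 0 := by omega
      subst hd0
      simp [Bcore_zero]
    · have hd1 : 1 ≤ d := by omega
      rw [if_neg hdz]
      by_cases hx : x ∈ s
      · rw [dif_pos hx]
        have hlt := pvFilterSuccLen_lt x s hx
        rw [ih (x + 1) d space hd (by omega), Bcore_mem s x d hd1 hx]
      · rw [dif_neg hx]
        have hle := pvFilterSuccLen_le x s
        rw [ih (x + 1) (d - 1) (space + x) (by omega) (by omega),
           Bcore_skip s x d hd1 hx]
        omega

-- ===== VERDICT (by name: the statement is the Claim_ definition above) =====
theorem reservedspace_spec : Claim_equal_reservedspace := by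
  intro d s _ hpre
  unfold Spec_reservedspace
  simp only [reservedspace, reservedspace_alt, cm_eq]
  rw [main_loop s _ _ d 0 hpre (le_refl _), zero_add]
  rfl
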